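-- pv_equiv track=rewrite | github.com/v-hung/chatbot-resume | app/utils/cccd_image_utils.py | group_edges_by_orientation
-- ===== SOURCE A (Python) =====
-- def group_edges_by_orientation(edges, img_shape):
-- 	height, width = img_shape[:2]
-- 	horizontal_edges = []
-- 	vertical_edges = []
--
-- 	for length, pt1, pt2 in edges:
-- 		dx = abs(pt2[0] - pt1[0])
-- 		dy = abs(pt2[1] - pt1[1])
-- 		if dx >= dy:
-- 			horizontal_edges.append((length, pt1, pt2))
-- 		else:
-- 			vertical_edges.append((length, pt1, pt2))
--
-- 	top_edges = []
-- 	bottom_edges = []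
-- 	for edge in horizontal_edges:
-- 		_, pt1, pt2 = edge
-- 		avg_y = (pt1[1] + pt2[1]) / 2
-- 		if avg_y < height / 2:
-- 			top_edges.append(edge)
-- 		else:
-- 			bottom_edges.append(edge)
--
-- 	left_edges = []
-- 	right_edges = []
-- 	for edge in vertical_edges:
-- 		_, pt1, pt2 = edge
-- 		avg_x = (pt1[0] + pt2[0]) / 2
-- 		if avg_x < width / 2:
-- 			left_edges.append(edge)
-- 		else:
-- 			right_edges.append(edge)
--
-- 	def pick_longest(edges_group):
-- 		return max(edges_group, key=lambda e: e[0]) if edges_group else None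
--
-- 	selected_edges = []
-- 	for group in [top_edges, bottom_edges, left_edges, right_edges]:
-- 		edge = pick_longest(group)
-- 		if edge:
-- 			selected_edges.append(edge)
--
-- 	return selected_edges
-- ===== SOURCE B (Python) =====
-- def group_edges_by_orientation(edges, img_shape):
-- 	# One pass: classify each edge into its side and keep the running longest
-- 	# (strictly greater replaces, so ties keep the first edge, like max()).
-- 	height, width = img_shape[:2]
-- 	best = {"top": None, "bottom": None, "left": None, "right": None}
-- 	for length, pt1, pt2 in edges:
-- 		dx = abs(pt2[0] - pt1[0])
-- 		dy = abs(pt2[1] - pt1[1])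
-- 		if dx >= dy:
-- 			side = "top" if (pt1[1] + pt2[1]) / 2 < height / 2 else "bottom"
-- 		else:
-- 			side = "left" if (pt1[0] + pt2[0]) / 2 < width / 2 else "right"
-- 		cur = best[side]
-- 		if cur is None or length > cur[0]:
-- 			best[side] = (length, pt1, pt2)
-- 	return [best[s] for s in ("top", "bottom", "left", "right") if best[s] is not None]
-- ===== Notes on version B (the rewrite author's own statement) =====
-- stated objective: simpler
-- what changed: Replaces A's three classification passes and four intermediate group lists with a single loop that classifies each edge and keeps a running longest edge per side (strict > so ties keep the first edge, matching max).
import Mathlib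
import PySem

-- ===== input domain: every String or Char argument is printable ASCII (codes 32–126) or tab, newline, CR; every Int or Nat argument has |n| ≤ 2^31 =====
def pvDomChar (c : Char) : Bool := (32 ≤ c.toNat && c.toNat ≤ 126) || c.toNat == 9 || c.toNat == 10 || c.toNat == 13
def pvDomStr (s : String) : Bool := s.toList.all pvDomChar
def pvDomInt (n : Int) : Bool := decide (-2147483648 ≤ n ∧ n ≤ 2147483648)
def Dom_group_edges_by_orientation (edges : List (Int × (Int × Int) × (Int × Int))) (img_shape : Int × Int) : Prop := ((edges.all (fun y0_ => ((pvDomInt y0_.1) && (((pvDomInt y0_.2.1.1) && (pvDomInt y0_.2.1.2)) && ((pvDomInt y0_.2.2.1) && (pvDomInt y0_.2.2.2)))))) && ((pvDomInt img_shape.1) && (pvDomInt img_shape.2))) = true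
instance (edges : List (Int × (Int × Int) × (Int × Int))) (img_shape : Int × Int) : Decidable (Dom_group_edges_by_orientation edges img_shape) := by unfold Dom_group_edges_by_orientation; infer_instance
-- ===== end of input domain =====

-- B replaces A's three classification passes and four intermediate group lists by a single
-- loop keeping the running longest edge per side (objective: simpler).
-- Float note: A compares '(y1+y2)/2 < height/2' (Python float division); on the domain
-- (|ints| ≤ 2^31) both halves are exact binary floats, so the test equals 'y1+y2 < height',
-- which is how both ports state it (same for the x/width test).

-- ===== PORT A =====
-- max(g, key=lambda e: e[0]) if g else None ; PySem.List.max? is Python's first-maximal max(key=...)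
def pvPickLongest (edges_group : List (Int × (Int × Int) × (Int × Int))) : Option (Int × (Int × Int) × (Int × Int)) :=
  if edges_group ≠ [] then PySem.List.max? edges_group (fun e => e.1) else none

def group_edges_by_orientation (edges : List (Int × (Int × Int) × (Int × Int))) (img_shape : Int × Int) : List (Int × (Int × Int) × (Int × Int)) :=
  let height := img_shape.1
  let width := img_shape.2
  -- first loop: split into horizontal / vertical (one pass appending to one of two lists)
  let hv := edges.foldl (fun (acc : List (Int × (Int × Int) × (Int × Int)) × List (Int × (Int × Int) × (Int × Int))) e =>
      let dx := (e.2.2.1 - e.2.1.1).natAbs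
      let dy := (e.2.2.2 - e.2.1.2).natAbs
      if dx ≥ dy then (acc.1 ++ [e], acc.2) else (acc.1, acc.2 ++ [e])) ([], [])
  let horizontal_edges := hv.1
  let vertical_edges := hv.2
  -- second loop: top / bottom by avg_y < height/2  (exact integer form, see header)
  let tb := horizontal_edges.foldl (fun (acc : List (Int × (Int × Int) × (Int × Int)) × List (Int × (Int × Int) × (Int × Int))) e =>
      if e.2.1.2 + e.2.2.2 < height then (acc.1 ++ [e], acc.2) else (acc.1, acc.2 ++ [e])) ([], [])
  -- third loop: left / right by avg_x < width/2
  let lr := vertical_edges.foldl (fun (acc : List (Int × (Int × Int) × (Int × Int)) × List (Int × (Int × Int) × (Int × Int))) e =>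
      if e.2.1.1 + e.2.2.1 < width then (acc.1 ++ [e], acc.2) else (acc.1, acc.2 ++ [e])) ([], [])
  -- final loop over the four groups
  [tb.1, tb.2, lr.1, lr.2].foldl (fun acc g =>
      match pvPickLongest g with
      | some e => acc ++ [e]
      | none => acc) []

-- ===== PORT B =====
-- running best per side; strictly greater length replaces
def pvBestUpd (cur : Option (Int × (Int × Int) × (Int × Int))) (e : Int × (Int × Int) × (Int × Int)) : Option (Int × (Int × Int) × (Int × Int)) :=
  match cur with
  | none => some e
  | some c => if c.1 < e.1 then some e else some c

def group_edges_by_orientation_alt (edges : List (Int × (Int × Int) × (Int × Int))) (img_shape : Int × Int) : List (Int × (Int × Int) × (Int × Int)) :=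
  let height := img_shape.1
  let width := img_shape.2
  let best := edges.foldl (fun (b : Option (Int × (Int × Int) × (Int × Int)) × Option (Int × (Int × Int) × (Int × Int)) × Option (Int × (Int × Int) × (Int × Int)) × Option (Int × (Int × Int) × (Int × Int))) e =>
      let dx := (e.2.2.1 - e.2.1.1).natAbs
      let dy := (e.2.2.2 - e.2.1.2).natAbs
      if dx ≥ dy then
        if e.2.1.2 + e.2.2.2 < height then (pvBestUpd b.1 e, b.2.1, b.2.2.1, b.2.2.2)
        else (b.1, pvBestUpd b.2.1 e, b.2.2.1, b.2.2.2)
      else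
        if e.2.1.1 + e.2.2.1 < width then (b.1, b.2.1, pvBestUpd b.2.2.1 e, b.2.2.2)
        else (b.1, b.2.1, b.2.2.1, pvBestUpd b.2.2.2 e)) (none, none, none, none)
  best.1.toList ++ best.2.1.toList ++ best.2.2.1.toList ++ best.2.2.2.toList

-- ===== PRECONDITION & SPEC =====
def Spec_group_edges_by_orientation (edges : List (Int × (Int × Int) × (Int × Int))) (img_shape : Int × Int) (out : List (Int × (Int × Int) × (Int × Int))) : Prop := out = group_edges_by_orientation_alt edges img_shape
instance (edges : List (Int × (Int × Int) × (Int × Int))) (img_shape : Int × Int) (out : List (Int × (Int × Int) × (Int × Int))) : Decidable (Spec_group_edges_by_orientation edges img_shape out) := by unfold Spec_group_edges_by_orientation; infer_instance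

-- ===== CLAIM (what is proved, stated in full; the proofs are below) =====
def Claim_equal_group_edges_by_orientation : Prop := ∀ (edges : List (Int × (Int × Int) × (Int × Int))) (img_shape : Int × Int), Dom_group_edges_by_orientation edges img_shape → Spec_group_edges_by_orientation edges img_shape (group_edges_by_orientation edges img_shape)

-- ===== LEMMAS AND PROOFS =====

-- A's first loop (split into horizontal / vertical) as a pair of filters
theorem pvFold1 (l : List (Int × (Int × Int) × (Int × Int))) (h v : List (Int × (Int × Int) × (Int × Int))) :
    l.foldl (fun (acc : List (Int × (Int × Int) × (Int × Int)) × List (Int × (Int × Int) × (Int × Int))) e =>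
        let dx := (e.2.2.1 - e.2.1.1).natAbs
        let dy := (e.2.2.2 - e.2.1.2).natAbs
        if dx ≥ dy then (acc.1 ++ [e], acc.2) else (acc.1, acc.2 ++ [e])) (h, v)
      = (h ++ l.filter (fun e => decide ((e.2.2.2 - e.2.1.2).natAbs ≤ (e.2.2.1 - e.2.1.1).natAbs)),
         v ++ l.filter (fun e => !decide ((e.2.2.2 - e.2.1.2).natAbs ≤ (e.2.2.1 - e.2.1.1).natAbs))) := by
  induction l generalizing h v with
  | nil => simp
  | cons a t ih =>
    by_cases hp : (a.2.2.2 - a.2.1.2).natAbs ≤ (a.2.2.1 - a.2.1.1).natAbs <;>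
      simp [hp, ih, ge_iff_le]

-- A's second/third loop shape: split by 'f e < c'
theorem pvFold2 (f : (Int × (Int × Int) × (Int × Int)) → Int) (c : Int)
    (l : List (Int × (Int × Int) × (Int × Int))) (h v : List (Int × (Int × Int) × (Int × Int))) :
    l.foldl (fun (acc : List (Int × (Int × Int) × (Int × Int)) × List (Int × (Int × Int) × (Int × Int))) e =>
        if f e < c then (acc.1 ++ [e], acc.2) else (acc.1, acc.2 ++ [e])) (h, v)
      = (h ++ l.filter (fun e => decide (f e < c)), v ++ l.filter (fun e => !decide (f e < c))) := by
  induction l generalizing h v with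
  | nil => simp
  | cons a t ih =>
    by_cases hp : f a < c <;> simp [hp, ih]

-- B's fold keeps, per side, the running-best fold of the corresponding filtered list
theorem pvAlt_fold (height width : Int) (l : List (Int × (Int × Int) × (Int × Int)))
    (b : Option (Int × (Int × Int) × (Int × Int)) × Option (Int × (Int × Int) × (Int × Int)) × Option (Int × (Int × Int) × (Int × Int)) × Option (Int × (Int × Int) × (Int × Int))) :
    l.foldl (fun b e =>
      let dx := (e.2.2.1 - e.2.1.1).natAbs
      let dy := (e.2.2.2 - e.2.1.2).natAbs
      if dx ≥ dy then
        if e.2.1.2 + e.2.2.2 < height then (pvBestUpd b.1 e, b.2.1, b.2.2.1, b.2.2.2)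
        else (b.1, pvBestUpd b.2.1 e, b.2.2.1, b.2.2.2)
      else
        if e.2.1.1 + e.2.2.1 < width then (b.1, b.2.1, pvBestUpd b.2.2.1 e, b.2.2.2)
        else (b.1, b.2.1, b.2.2.1, pvBestUpd b.2.2.2 e)) b
    = ((l.filter (fun e => decide (e.2.1.2 + e.2.2.2 < height) && decide ((e.2.2.2 - e.2.1.2).natAbs ≤ (e.2.2.1 - e.2.1.1).natAbs))).foldl pvBestUpd b.1,
       (l.filter (fun e => !decide (e.2.1.2 + e.2.2.2 < height) && decide ((e.2.2.2 - e.2.1.2).natAbs ≤ (e.2.2.1 - e.2.1.1).natAbs))).foldl pvBestUpd b.2.1,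
       (l.filter (fun e => decide (e.2.1.1 + e.2.2.1 < width) && !decide ((e.2.2.2 - e.2.1.2).natAbs ≤ (e.2.2.1 - e.2.1.1).natAbs))).foldl pvBestUpd b.2.2.1,
       (l.filter (fun e => !decide (e.2.1.1 + e.2.2.1 < width) && !decide ((e.2.2.2 - e.2.1.2).natAbs ≤ (e.2.2.1 - e.2.1.1).natAbs))).foldl pvBestUpd b.2.2.2) := by
  induction l generalizing b with
  | nil => simp
  | cons a t ih =>
    by_cases h1 : (a.2.2.2 - a.2.1.2).natAbs ≤ (a.2.2.1 - a.2.1.1).natAbs <;>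
      by_cases h2 : a.2.1.2 + a.2.2.2 < height <;>
      by_cases h3 : a.2.1.1 + a.2.2.1 < width <;>
      simp [h1, h2, h3, ge_iff_le, ih]

-- max?(key = .1) is exactly the running-best fold with strict replacement
theorem pvMax?_eq_foldl (g : List (Int × (Int × Int) × (Int × Int))) :
    PySem.List.max? g (fun e => e.1) = g.foldl pvBestUpd none := by
  simp only [PySem.List.max?]
  congr 1
  funext acc x
  cases acc <;> rfl

theorem pvPickLongest_eq (g : List (Int × (Int × Int) × (Int × Int))) :
    pvPickLongest g = g.foldl pvBestUpd none := by
  rcases g with _ | ⟨a, t⟩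
  · simp [pvPickLongest]
  · simp [pvPickLongest, pvMax?_eq_foldl]

-- ===== VERDICT (by name: the statement is the Claim_ definition above) =====
theorem group_edges_by_orientation_spec : Claim_equal_group_edges_by_orientation := by
  intro edges img_shape _
  unfold Spec_group_edges_by_orientation group_edges_by_orientation group_edges_by_orientation_alt
  simp only [pvFold1, pvFold2 (fun e => e.2.1.2 + e.2.2.2) img_shape.1,
    pvFold2 (fun e => e.2.1.1 + e.2.2.1) img_shape.2, pvAlt_fold,
    List.nil_append, List.filter_filter, pvPickLongest_eq,
    List.foldl_cons, List.foldl_nil]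
  generalize (List.filter (fun e => decide (e.2.1.2 + e.2.2.2 < img_shape.1) && decide ((e.2.2.2 - e.2.1.2).natAbs ≤ (e.2.2.1 - e.2.1.1).natAbs)) edges).foldl pvBestUpd none = o1
  generalize (List.filter (fun e => !decide (e.2.1.2 + e.2.2.2 < img_shape.1) && decide ((e.2.2.2 - e.2.1.2).natAbs ≤ (e.2.2.1 - e.2.1.1).natAbs)) edges).foldl pvBestUpd none = o2
  generalize (List.filter (fun e => decide (e.2.1.1 + e.2.2.1 < img_shape.2) && !decide ((e.2.2.2 - e.2.1.2).natAbs ≤ (e.2.2.1 - e.2.1.1).natAbs)) edges).foldl pvBestUpd none = o3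
  generalize (List.filter (fun e => !decide (e.2.1.1 + e.2.2.1 < img_shape.2) && !decide ((e.2.2.2 - e.2.1.2).natAbs ≤ (e.2.2.1 - e.2.1.1).natAbs)) edges).foldl pvBestUpd none = o4
  cases o1 <;> cases o2 <;> cases o3 <;> cases o4 <;> rfl
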